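-- pv_equiv track=rewrite | github.com/Prakhar9001/ai-resume-intelligence | backend/app/ai/chunker.py | chunk_by_roles
-- ===== SOURCE A (Python) =====
-- MAX_CHUNK_WORDS = 300
--
-- def make_chunk(section, text, subsection=None):
--     return {
--         "section": section,
--         "subsection": subsection,
--         "text": text.strip()
--     }
--
-- def chunk_by_roles(section: str, text: str) -> list:
--     lines = text.split("\n")
--     chunks = []
--
--     current_role = None
--     buffer = []
--
--     for line in lines:
--         if is_new_role(line):
--             if buffer:
--                 chunks.append(make_chunk(section, "\n".join(buffer), current_role))
--                 buffer = []
--             current_role = line.strip()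
--         else:
--             buffer.append(line)
--
--     if buffer:
--         chunks.append(make_chunk(section, "\n".join(buffer), current_role))
--
--     return split_large_chunks(chunks)
--
-- def is_new_role(line: str) -> bool:
--     return (
--         len(line.split()) <= 8
--         and not line.strip().startswith("-")
--     )
--
-- def split_large_chunks(chunks: list) -> list:
--     final_chunks = []
--
--     for chunk in chunks:
--         words = chunk["text"].split()
--         if len(words) <= MAX_CHUNK_WORDS:
--             final_chunks.append(chunk)
--         else:
--             for i in range(0, len(words), MAX_CHUNK_WORDS):
--                 split_text = " ".join(words[i:i + MAX_CHUNK_WORDS])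
--                 final_chunks.append({
--                     **chunk,
--                     "text": split_text
--                 })
--
--     return final_chunks
-- ===== SOURCE B (Python) =====
-- MAX_CHUNK_WORDS = 300
--
-- def is_new_role(line: str) -> bool:
--     return (
--         len(line.split()) <= 8
--         and not line.strip().startswith("-")
--     )
--
-- def _emit(section, role, rev_buf):
--     """Emit the chunks for one group; rev_buf holds its lines in reverse order."""
--     t = "\n".join(reversed(rev_buf)).strip()
--     words = t.split()
--     if len(words) <= MAX_CHUNK_WORDS:
--         return [{"section": section, "subsection": role, "text": t}]
--     return [{"section": section, "subsection": role,
--              "text": " ".join(words[i:i + MAX_CHUNK_WORDS])}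
--             for i in range(0, len(words), MAX_CHUNK_WORDS)]
--
-- def chunk_by_roles(section: str, text: str) -> list:
--     # Scan the document BACKWARDS: a group's lines are collected first, and the
--     # header met next (the nearest one above them) is its role, so no
--     # current_role state and no second splitting pass are needed.
--     pieces = []   # emitted chunk groups, in reverse document order
--     buf = []      # pending lines of the current group, in reverse order
--     for line in reversed(text.split("\n")):
--         if is_new_role(line):
--             if buf:
--                 pieces.append(_emit(section, line.strip(), buf))
--                 buf = []
--         else:
--             buf.append(line)
--     if buf:
--         pieces.append(_emit(section, None, buf))
--     return [chunk for grp in reversed(pieces) for chunk in grp]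
-- ===== Notes on version B (the rewrite author's own statement) =====
-- stated objective: alternative
-- what changed: B scans the lines in REVERSE document order: group lines are collected first and the nearest header encountered next supplies their role, so the forward pass's current_role state variable and A's whole second split_large_chunks rescan disappear; size-splitting happens inline at each flush and the collected groups are flattened back-to-front at the end.
import Mathlib
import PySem

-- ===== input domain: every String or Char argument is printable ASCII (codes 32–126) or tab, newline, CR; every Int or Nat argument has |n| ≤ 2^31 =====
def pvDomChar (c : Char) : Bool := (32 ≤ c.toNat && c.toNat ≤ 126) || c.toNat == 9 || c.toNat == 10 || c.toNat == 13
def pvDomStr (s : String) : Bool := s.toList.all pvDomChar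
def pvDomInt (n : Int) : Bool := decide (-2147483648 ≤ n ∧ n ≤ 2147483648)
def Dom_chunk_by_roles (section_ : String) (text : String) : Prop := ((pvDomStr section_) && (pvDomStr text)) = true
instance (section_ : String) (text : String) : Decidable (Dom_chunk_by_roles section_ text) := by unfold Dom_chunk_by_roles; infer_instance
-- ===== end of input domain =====

-- B scans the lines in REVERSE order (a group's lines are collected first, the nearest header
-- above them supplies the role), emitting the size-split chunks inline at each flush, so A's
-- current_role state and the whole split_large_chunks second pass disappear; objective: alternative.

-- ===== PORT A =====
def MAX_CHUNK_WORDS : Int := 300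

def make_chunk (section_ : String) (text : String) (subsection_ : Option String) :
    List (String × Option String) :=
  [("section", some section_), ("subsection", subsection_), ("text", some (PySem.Str.strip text))]

def is_new_role (line : String) : Bool :=
  decide ((PySem.Str.split₀ line).length ≤ 8) && !(PySem.Str.startswith (PySem.Str.strip line) "-")

def split_large_chunks (chunks : List (List (String × Option String))) :
    List (List (String × Option String)) :=
  chunks.foldl (fun final_chunks chunk =>
    -- chunk["text"]: always present here (chunks come from make_chunk), so the `getD … none` default is unreachable
    let words := PySem.Str.split₀ ((PySem.Dict.getD (PySem.Dict.mk chunk) "text" none).getD "")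
    if (words.length : Int) ≤ MAX_CHUNK_WORDS then
      final_chunks ++ [chunk]
    else
      (PySem.List.pyRange 0 (words.length : Int) MAX_CHUNK_WORDS).foldl (fun fc i =>
        fc ++ [(PySem.Dict.insert (PySem.Dict.mk chunk) "text"
                (some (PySem.Str.join " " (PySem.List.slice words (some i) (some (i + MAX_CHUNK_WORDS)))))).items])
        final_chunks) []

-- A's loop body (the for-line step of chunk_by_roles), as a named helper
def chunk_step (section_ : String)
    (st : List (List (String × Option String)) × Option String × List String) (line : String) :
    List (List (String × Option String)) × Option String × List String :=
  if is_new_role line then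
    (if st.2.2 ≠ [] then st.1 ++ [make_chunk section_ (PySem.Str.join "\n" st.2.2) st.2.1]
     else st.1,
     some (PySem.Str.strip line), [])
  else
    (st.1, st.2.1, st.2.2 ++ [line])

def chunk_by_roles (section_ : String) (text : String) : List (List (String × Option String)) :=
  -- text.split("\n"): the separator is nonempty, so split? never returns none
  let lines := (PySem.Str.split? text "\n").getD []
  let st := lines.foldl (chunk_step section_) ([], none, [])
  split_large_chunks
    (if st.2.2 ≠ [] then st.1 ++ [make_chunk section_ (PySem.Str.join "\n" st.2.2) st.2.1] else st.1)

-- ===== PORT B =====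
-- _emit: the chunks for one group; rev_buf holds the group's lines in reverse order
def emit_chunks (section_ : String) (role : Option String) (rev_buf : List String) :
    List (List (String × Option String)) :=
  let t := PySem.Str.strip (PySem.Str.join "\n" rev_buf.reverse)
  let words := PySem.Str.split₀ t
  if (words.length : Int) ≤ MAX_CHUNK_WORDS then
    [[("section", some section_), ("subsection", role), ("text", some t)]]
  else
    (PySem.List.pyRange 0 (words.length : Int) MAX_CHUNK_WORDS).map (fun i =>
      [("section", some section_), ("subsection", role),
       ("text", some (PySem.Str.join " " (PySem.List.slice words (some i) (some (i + MAX_CHUNK_WORDS)))))])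

-- B's loop body over the reversed line list; state = (pieces, buf)
def alt_step (section_ : String)
    (st : List (List (List (String × Option String))) × List String) (line : String) :
    List (List (List (String × Option String))) × List String :=
  if is_new_role line then
    if st.2 ≠ [] then
      (st.1 ++ [emit_chunks section_ (some (PySem.Str.strip line)) st.2], [])
    else st
  else
    (st.1, st.2 ++ [line])

def chunk_by_roles_alt (section_ : String) (text : String) : List (List (String × Option String)) :=
  let st := (((PySem.Str.split? text "\n").getD []).reverse).foldl (alt_step section_) ([], [])
  let pieces := if st.2 ≠ [] then st.1 ++ [emit_chunks section_ none st.2] else st.1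
  pieces.reverse.flatMap (fun grp => grp)

-- ===== PRECONDITION & SPEC =====
def Spec_chunk_by_roles (section_ : String) (text : String) (out : List (List (String × Option String))) : Prop := out = chunk_by_roles_alt section_ text
instance (section_ : String) (text : String) (out : List (List (String × Option String))) : Decidable (Spec_chunk_by_roles section_ text out) := by unfold Spec_chunk_by_roles; infer_instance

-- ===== CLAIM (what is proved, stated in full; the proofs are below) =====
def Claim_equal_chunk_by_roles : Prop := ∀ (section_ : String) (text : String), Dom_chunk_by_roles section_ text → Spec_chunk_by_roles section_ text (chunk_by_roles section_ text)

-- ===== LEMMAS AND PROOFS =====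

-- split_large_chunks's per-chunk emitter
def pvEmit (chunk : List (String × Option String)) : List (List (String × Option String)) :=
  let words := PySem.Str.split₀ ((PySem.Dict.getD (PySem.Dict.mk chunk) "text" none).getD "")
  if (words.length : Int) ≤ MAX_CHUNK_WORDS then [chunk]
  else
    (PySem.List.pyRange 0 (words.length : Int) MAX_CHUNK_WORDS).map (fun i =>
      (PySem.Dict.insert (PySem.Dict.mk chunk) "text"
        (some (PySem.Str.join " " (PySem.List.slice words (some i) (some (i + MAX_CHUNK_WORDS)))))).items)

lemma split_large_eq_flatMap (chunks : List (List (String × Option String))) :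
    split_large_chunks chunks = chunks.flatMap pvEmit := by
  unfold split_large_chunks
  have hbody : (fun (final_chunks : List (List (String × Option String))) chunk =>
      let words := PySem.Str.split₀ ((PySem.Dict.getD (PySem.Dict.mk chunk) "text" none).getD "")
      if (words.length : Int) ≤ MAX_CHUNK_WORDS then
        final_chunks ++ [chunk]
      else
        (PySem.List.pyRange 0 (words.length : Int) MAX_CHUNK_WORDS).foldl (fun fc i =>
          fc ++ [(PySem.Dict.insert (PySem.Dict.mk chunk) "text"
                  (some (PySem.Str.join " " (PySem.List.slice words (some i) (some (i + MAX_CHUNK_WORDS)))))).items])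
          final_chunks)
      = fun final_chunks chunk => final_chunks ++ pvEmit chunk := by
    funext final_chunks chunk
    simp only [pvEmit]
    split
    · rfl
    · rw [PySem.List.foldl_append_singleton_eq_map]
  rw [hbody, PySem.List.foldl_append_eq_flatMap pvEmit, List.nil_append]

-- reading / overwriting the "text" slot of a make_chunk-shaped literal dict
lemma pvDict_getD_text (a b c : Option String) :
    PySem.Dict.getD ⟨[("section", a), ("subsection", b), ("text", c)]⟩ "text" none = c := rfl

lemma pvDict_insert_text (a b c v : Option String) :
    (PySem.Dict.insert ⟨[("section", a), ("subsection", b), ("text", c)]⟩ "text" v).items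
      = [("section", a), ("subsection", b), ("text", v)] := rfl

-- B's emitter is A's emitter applied to the corresponding make_chunk dict
lemma emit_chunks_eq (section_ : String) (role : Option String) (b : List String) :
    emit_chunks section_ role b
      = pvEmit (make_chunk section_ (PySem.Str.join "\n" b.reverse) role) := by
  simp only [emit_chunks, pvEmit, make_chunk, pvDict_getD_text, pvDict_insert_text,
    Option.getD_some]

-- the flush of a pending group, on its lines in document order
def pvF (section_ : String) (role : Option String) (buf : List String) :
    List (List (String × Option String)) :=
  if buf = [] then [] else pvEmit (make_chunk section_ (PySem.Str.join "\n" buf) role)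

-- forward grouping-and-emitting spec, structural on the remaining lines
def pvG (section_ : String) (role : Option String) (buf : List String) :
    List String → List (List (String × Option String))
  | [] => pvF section_ role buf
  | l :: t =>
    if is_new_role l then
      pvF section_ role buf ++ pvG section_ (some (PySem.Str.strip l)) [] t
    else
      pvG section_ role (buf ++ [l]) t

-- the part of the output after the leading headerless run
def pvGrest (section_ : String) (ls : List String) : List (List (String × Option String)) :=
  match ls.dropWhile (fun l => !is_new_role l) with
  | [] => []
  | h :: t => pvG section_ (some (PySem.Str.strip h)) [] t

lemma pvG_decomp (section_ : String) (ls : List String) :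
    ∀ (role : Option String) (buf : List String),
      pvG section_ role buf ls
        = pvF section_ role (buf ++ ls.takeWhile (fun l => !is_new_role l)) ++ pvGrest section_ ls := by
  induction ls with
  | nil => intro role buf; simp [pvG, pvGrest]
  | cons l t ih =>
    intro role buf
    by_cases h : is_new_role l
    · simp [pvG, pvGrest, h]
    · simp only [pvG, pvGrest, h, Bool.false_eq_true, if_neg, not_false_eq_true,
        List.takeWhile_cons, List.dropWhile_cons, Bool.not_false, if_pos, ih]
      simp [List.append_assoc]

-- A-side: the flushed fold, fed through pvEmit, is the forward spec
lemma A_fold (section_ : String) (ls : List String) :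
    ∀ (c : List (List (String × Option String))) (role : Option String) (buf : List String),
      (if (ls.foldl (chunk_step section_) (c, role, buf)).2.2 ≠ [] then
         (ls.foldl (chunk_step section_) (c, role, buf)).1
           ++ [make_chunk section_
                (PySem.Str.join "\n" (ls.foldl (chunk_step section_) (c, role, buf)).2.2)
                (ls.foldl (chunk_step section_) (c, role, buf)).2.1]
       else (ls.foldl (chunk_step section_) (c, role, buf)).1).flatMap pvEmit
      = c.flatMap pvEmit ++ pvG section_ role buf ls := by
  induction ls with
  | nil =>
    intro c role buf
    by_cases h : buf = [] <;> simp [h, pvG, pvF]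
  | cons l t ih =>
    intro c role buf
    simp only [List.foldl_cons, chunk_step]
    by_cases h : is_new_role l
    · simp only [h, if_pos, ih, pvG]
      by_cases hb : buf = [] <;> simp [hb, pvF, List.append_assoc]
    · simp only [h, Bool.false_eq_true, if_neg, not_false_eq_true, ih, pvG]

-- B-side: state invariant of the reverse scan
lemma B_inv (section_ : String) (ls : List String) :
    (ls.reverse.foldl (alt_step section_) ([], [])).2.reverse
        = ls.takeWhile (fun l => !is_new_role l)
    ∧ (ls.reverse.foldl (alt_step section_) ([], [])).1.reverse.flatMap (fun grp => grp)
        = pvGrest section_ ls := by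
  induction ls with
  | nil => constructor <;> rfl
  | cons l t ih =>
    obtain ⟨ih1, ih2⟩ := ih
    have hstep : (l :: t).reverse.foldl (alt_step section_) ([], [])
        = alt_step section_ (t.reverse.foldl (alt_step section_) ([], [])) l := by
      rw [List.reverse_cons, List.foldl_append, List.foldl_cons, List.foldl_nil]
    rw [hstep]
    set st := t.reverse.foldl (alt_step section_) ([], []) with hst
    clear hstep hst
    by_cases h : is_new_role l
    · by_cases hb : st.2 = []
      · have ht : t.takeWhile (fun l => !is_new_role l) = [] := by rw [← ih1, hb]; rfl
        constructor
        · simp [alt_step, h, hb]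
        · simp only [alt_step, h, if_true, hb, ne_eq, not_true_eq_false, if_neg,
            not_false_eq_true, ih2]
          simp only [pvGrest, List.dropWhile_cons, h, Bool.not_true, Bool.false_eq_true,
            if_neg, not_false_eq_true]
          rw [pvG_decomp]
          simp [ht, pvF]
          rfl
      · have hbr : st.2.reverse ≠ [] := by simpa using hb
        constructor
        · simp [alt_step, h, hb]
        · simp only [alt_step, h, hb, ne_eq, not_false_eq_true, if_pos]
          rw [List.reverse_append]
          simp only [List.reverse_singleton, List.singleton_append, List.flatMap_cons, ih2]
          simp only [pvGrest, List.dropWhile_cons, h, Bool.not_true, Bool.false_eq_true,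
            if_neg, not_false_eq_true]
          rw [pvG_decomp, ← ih1]
          simp [pvF, hbr, emit_chunks_eq]
          rfl
    · constructor
      · simp [alt_step, h, ← ih1]
      · simp only [alt_step, h, Bool.false_eq_true, if_neg, not_false_eq_true, ih2]
        simp [pvGrest, h]

-- ===== VERDICT (by name: the statement is the Claim_ definition above) =====
theorem chunk_by_roles_spec : Claim_equal_chunk_by_roles := by
  intro section_ text _
  show chunk_by_roles section_ text = chunk_by_roles_alt section_ text
  simp only [chunk_by_roles, chunk_by_roles_alt, split_large_eq_flatMap]
  have h1 := (B_inv section_ ((PySem.Str.split? text "\n").getD [])).1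
  have h2 := (B_inv section_ ((PySem.Str.split? text "\n").getD [])).2
  rw [A_fold section_ ((PySem.Str.split? text "\n").getD []) [] none []]
  set st := ((PySem.Str.split? text "\n").getD []).reverse.foldl (alt_step section_) ([], []) with hst
  clear hst
  rw [pvG_decomp]
  simp only [List.flatMap_nil, List.nil_append]
  by_cases hb : st.2 = []
  · have ht : ((PySem.Str.split? text "\n").getD []).takeWhile (fun l => !is_new_role l) = [] := by
      rw [← h1, hb]; rfl
    rw [ht]
    simp only [hb, ne_eq, not_true_eq_false, if_neg, not_false_eq_true, h2]
    simp [pvF]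
  · have hbr : st.2.reverse ≠ [] := by simpa using hb
    simp only [hb, ne_eq, not_false_eq_true, if_pos]
    rw [List.reverse_append]
    simp only [List.reverse_singleton, List.singleton_append, List.flatMap_cons, h2]
    rw [← h1]
    simp [pvF, hbr, emit_chunks_eq]
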